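-- pv_equiv track=rewrite | github.com/oeg-upm/tada-qq | tadaqq/util/__init__.py | fname_to_uri
-- ===== SOURCE A (Python) =====
-- def fname_to_uri(fname, replace_sep=True):
--     """
--
--     """
--     pref = {
--         'dbo': 'dbpedia.org/ontology',
--         'dbp': 'dbpedia.org/property',
--         'dbr': 'dbpedia.org/resource',
--         'foaf': 'xmlns.com/foaf/0.1',
--         'owl': 'www.w3.org/2002/07/owl',
--         'rdfs': 'www.w3.org/2000/01/rdf-schema',
--         'rdf': 'www.w3.org/1999/02/22-rdf-syntax-ns',
--     }
--     protocol = "http://"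
--     base_uri = ""
--     rel_name = ""
--     for k in pref.keys():
--         kd = k+"-"
--         if fname.startswith(kd):
--             base_uri = pref[k]
--             rel_name = fname[len(kd):]
--     rel_path = rel_name
--     if replace_sep:
--         rel_path = rel_name.replace('-', '/')
--     uri = "/".join([protocol + base_uri, rel_path])
--     return uri
-- ===== SOURCE B (Python) =====
-- def _base_of(p):
--     if p == 'dbo':
--         return 'dbpedia.org/ontology'
--     elif p == 'dbp':
--         return 'dbpedia.org/property'
--     elif p == 'dbr':
--         return 'dbpedia.org/resource'
--     elif p == 'foaf':
--         return 'xmlns.com/foaf/0.1'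
--     elif p == 'owl':
--         return 'www.w3.org/2002/07/owl'
--     elif p == 'rdfs':
--         return 'www.w3.org/2000/01/rdf-schema'
--     elif p == 'rdf':
--         return 'www.w3.org/1999/02/22-rdf-syntax-ns'
--     else:
--         return None
--
--
-- def fname_to_uri(fname, replace_sep=True):
--     # single character scan for the first '-'; no dict, no startswith
--     head = []
--     rest = None
--     for i, c in enumerate(fname):
--         if c == '-':
--             rest = fname[i + 1:]
--             break
--         head.append(c)
--     base, rel = '', ''
--     if rest is not None:
--         b = _base_of(''.join(head))
--         if b is not None:
--             base, rel = b, rest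
--     if replace_sep:
--         rel = ''.join('/' if c == '-' else c for c in rel)
--     return 'http://' + base + '/' + rel
-- ===== Notes on version B (the rewrite author's own statement) =====
-- stated objective: alternative
-- what changed: B replaces A's loop over all seven keys with startswith tests by a single character scan that splits fname at the first dash, an if/elif chain (no dict) mapping the scanned prefix to its base URI, and a per-character map for the dash-to-slash substitution.
import Mathlib
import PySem

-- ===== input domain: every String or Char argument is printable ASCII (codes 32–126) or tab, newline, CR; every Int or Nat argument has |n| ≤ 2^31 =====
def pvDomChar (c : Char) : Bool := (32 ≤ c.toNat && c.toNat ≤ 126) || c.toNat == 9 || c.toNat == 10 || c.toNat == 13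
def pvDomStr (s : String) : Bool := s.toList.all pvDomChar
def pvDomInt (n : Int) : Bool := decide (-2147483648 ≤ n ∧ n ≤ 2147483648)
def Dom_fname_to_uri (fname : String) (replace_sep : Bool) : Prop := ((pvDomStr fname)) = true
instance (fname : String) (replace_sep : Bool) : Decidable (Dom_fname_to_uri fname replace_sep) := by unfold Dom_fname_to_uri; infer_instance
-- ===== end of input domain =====

-- B replaces A's scan over all prefix keys (dict + startswith) by a single character scan that
-- splits at the first dash, an if/elif chain mapping the prefix, and a per-character dash→slash
-- map (objective: alternative; same behaviour, equivalence proved below).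

-- ===== PORT A =====
def pvPrefA : PySem.Dict String String := PySem.Dict.ofList
  [("dbo", "dbpedia.org/ontology"),
   ("dbp", "dbpedia.org/property"),
   ("dbr", "dbpedia.org/resource"),
   ("foaf", "xmlns.com/foaf/0.1"),
   ("owl", "www.w3.org/2002/07/owl"),
   ("rdfs", "www.w3.org/2000/01/rdf-schema"),
   ("rdf", "www.w3.org/1999/02/22-rdf-syntax-ns")]

def fname_to_uri (fname : String) (replace_sep : Bool) : String :=
  let pref := pvPrefA
  let protocol := "http://"
  -- for k in pref.keys(): if fname.startswith(k+"-"): base_uri, rel_name := pref[k], fname[len(k+"-"):]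
  let st :=
    pref.keys.foldl (fun (st : String × String) k =>
      let kd := k ++ "-"
      if PySem.Str.startswith fname kd then
        (pref.getD k "", PySem.Str.slice fname (some (PySem.Str.len kd)) none)
      else st) ("", "")
  let rel_path := if replace_sep then PySem.Str.replace st.2 "-" "/" else st.2
  PySem.Str.join "/" [protocol ++ st.1, rel_path]

-- ===== PORT B =====
-- scan for the first '-' : returns none if there is no dash, else (chars before it, chars after)
def pvSplitDash : List Char → Option (List Char × List Char)
  | [] => none
  | c :: t =>
    if c = '-' then some ([], t)
    else
      match pvSplitDash t with
      | none => none
      | some (h, r) => some (c :: h, r)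

-- the if/elif chain _base_of
def pvBaseOf (p : List Char) : Option (List Char) :=
  if p = ['d','b','o'] then some "dbpedia.org/ontology".toList
  else if p = ['d','b','p'] then some "dbpedia.org/property".toList
  else if p = ['d','b','r'] then some "dbpedia.org/resource".toList
  else if p = ['f','o','a','f'] then some "xmlns.com/foaf/0.1".toList
  else if p = ['o','w','l'] then some "www.w3.org/2002/07/owl".toList
  else if p = ['r','d','f','s'] then some "www.w3.org/2000/01/rdf-schema".toList
  else if p = ['r','d','f'] then some "www.w3.org/1999/02/22-rdf-syntax-ns".toList
  else none

def fname_to_uri_alt (fname : String) (replace_sep : Bool) : String :=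
  let br : List Char × List Char :=
    match pvSplitDash fname.toList with
    | none => ([], [])
    | some (h, r) =>
      match pvBaseOf h with
      | none => ([], [])
      | some b => (b, r)
  let rel := if replace_sep then br.2.map (fun c => if c = '-' then '/' else c) else br.2
  String.ofList ("http://".toList ++ br.1 ++ ['/'] ++ rel)

-- ===== PRECONDITION & SPEC =====
def Spec_fname_to_uri (fname : String) (replace_sep : Bool) (out : String) : Prop := out = fname_to_uri_alt fname replace_sep
instance (fname : String) (replace_sep : Bool) (out : String) : Decidable (Spec_fname_to_uri fname replace_sep out) := by unfold Spec_fname_to_uri; infer_instance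

-- ===== CLAIM =====
def Claim_equal_fname_to_uri : Prop := ∀ (fname : String) (replace_sep : Bool), Dom_fname_to_uri fname replace_sep → Spec_fname_to_uri fname replace_sep (fname_to_uri fname replace_sep)

-- ===== LEMMAS AND PROOFS =====

theorem pv_split_none (l : List Char) (h : pvSplitDash l = none) : '-' ∉ l := by
  induction l with
  | nil => simp
  | cons c t ih =>
    simp only [pvSplitDash] at h
    by_cases hc : c = '-'
    · simp [hc] at h
    · rw [if_neg hc] at h
      cases hs : pvSplitDash t with
      | none =>
        have hn := ih hs
        simp only [List.mem_cons, not_or]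
        exact ⟨fun e => hc e.symm, hn⟩
      | some p => rw [hs] at h; obtain ⟨h1, h2⟩ := p; simp at h

theorem pv_split_some (l h r : List Char) (hs : pvSplitDash l = some (h, r)) :
    l = h ++ '-' :: r ∧ '-' ∉ h := by
  induction l generalizing h r with
  | nil => simp [pvSplitDash] at hs
  | cons c t ih =>
    simp only [pvSplitDash] at hs
    by_cases hc : c = '-'
    · rw [if_pos hc] at hs
      simp only [Option.some.injEq, Prod.mk.injEq] at hs
      obtain ⟨rfl, rfl⟩ := hs
      simp [hc]
    · rw [if_neg hc] at hs
      cases hs2 : pvSplitDash t with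
      | none => rw [hs2] at hs; simp at hs
      | some p =>
        obtain ⟨h', r'⟩ := p
        rw [hs2] at hs
        simp only [Option.some.injEq, Prod.mk.injEq] at hs
        obtain ⟨rfl, rfl⟩ := hs
        obtain ⟨ht, hnh⟩ := ih h' r' hs2
        refine ⟨by simp [ht], ?_⟩
        simp only [List.mem_cons, not_or]
        exact ⟨fun e => hc e.symm, hnh⟩

-- with no dash in k or h, the dashed key k++['-'] is a prefix of h++'-'::r iff k = h
theorem pv_dash_prefix_iff : ∀ (k h r : List Char), '-' ∉ k → '-' ∉ h →
    ((k ++ ['-']) <+: (h ++ '-' :: r) ↔ k = h)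
  | [], [], r, _, _ => by simp
  | [], c :: h', r, _, hh => by
    have hc : ¬ ('-' = c) := fun e => hh (by simp [← e])
    simp [List.cons_prefix_cons, hc]
  | a :: k', [], r, hk, _ => by
    have ha : ¬ (a = '-') := fun e => hk (by simp [e])
    simp [List.cons_prefix_cons, ha]
  | a :: k', c :: h', r, hk, hh => by
    have ih := pv_dash_prefix_iff k' h' r (fun m => hk (by simp [m])) (fun m => hh (by simp [m]))
    simp [List.cons_prefix_cons, ih]

-- Python's replace with one-char old/new is the per-character map
theorem pv_go_map (l : List Char) (acc : List Char) (fuel : Nat) (hf : l.length ≤ fuel) :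
    PySem.Chars.replace.go ['-'] ['/'] fuel l acc =
      acc.reverse ++ l.map (fun c => if c = '-' then '/' else c) := by
  induction l generalizing fuel acc with
  | nil => cases fuel <;> simp [PySem.Chars.replace.go]
  | cons c t ih =>
    cases fuel with
    | zero => simp at hf
    | succ n =>
      simp only [PySem.Chars.replace.go]
      by_cases hc : c = '-'
      · subst hc
        rw [if_pos (by simp [List.isPrefixOf])]
        simpa using ih ('/' :: acc) n (by simpa using hf)
      · rw [if_neg (by simp [List.isPrefixOf, Ne.symm hc])]
        simpa [hc] using ih (c :: acc) n (by simpa using hf)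

theorem pv_replace_map (l : List Char) :
    PySem.Chars.replace l ['-'] ['/'] = l.map (fun c => if c = '-' then '/' else c) := by
  simpa using pv_go_map l [] l.length le_rfl

-- "/".join([a, b]) is a ++ "/" ++ b
theorem pv_join2 (a b : String) : PySem.Str.join "/" [a, b] = a ++ "/" ++ b := by
  apply String.ext
  simp [PySem.Str.toList_join, PySem.Chars.join_cons_cons, PySem.Chars.join_singleton]

-- ===== VERDICT =====
theorem fname_to_uri_spec : Claim_equal_fname_to_uri := by
  intro fname rs _
  unfold Spec_fname_to_uri
  have hkeys : pvPrefA.keys = ["dbo", "dbp", "dbr", "foaf", "owl", "rdfs", "rdf"] := rfl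
  cases hsplit : pvSplitDash fname.toList with
  | none =>
    have hnd : '-' ∉ fname.toList := pv_split_none _ hsplit
    have hsw : ∀ k : String, PySem.Str.startswith fname (k ++ "-") = false := by
      intro k
      rw [PySem.Str.startswith_eq, Bool.eq_false_iff]
      intro htrue
      have hpre := (PySem.Chars.startswith_iff _ _).mp htrue
      exact hnd (hpre.subset (by simp))
    simp only [fname_to_uri, fname_to_uri_alt, hkeys, List.foldl_cons, List.foldl_nil,
      hsw, Bool.false_eq_true, if_false, hsplit]
    apply String.ext
    cases rs <;>
      simp [pv_join2, PySem.Str.toList_replace, pv_replace_map]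
  | some p =>
    obtain ⟨h, r⟩ := p
    obtain ⟨hl, hh⟩ := pv_split_some _ _ _ hsplit
    have hb : ∀ k : String, '-' ∉ k.toList →
        PySem.Str.startswith fname (k ++ "-") = decide (k.toList = h) := by
      intro k hk
      have hiff : PySem.Str.startswith fname (k ++ "-") = true ↔ k.toList = h := by
        rw [PySem.Str.startswith_eq, PySem.Chars.startswith_iff]
        have he : (k ++ "-").toList = k.toList ++ ['-'] := by simp
        rw [he, hl]
        exact pv_dash_prefix_iff k.toList h r hk hh
      by_cases hK : k.toList = h
      · rw [hiff.mpr hK]; simp [hK]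
      · cases hS : PySem.Str.startswith fname (k ++ "-")
        · simp [hK]
        · exact absurd (hiff.mp hS) hK
    have hb1 := hb "dbo" (by decide)
    have hb2 := hb "dbp" (by decide)
    have hb3 := hb "dbr" (by decide)
    have hb4 := hb "foaf" (by decide)
    have hb5 := hb "owl" (by decide)
    have hb6 := hb "rdfs" (by decide)
    have hb7 := hb "rdf" (by decide)
    have hsl : ∀ (n : Int), 0 ≤ n →
        PySem.List.slice fname.toList (some n) none = List.drop n.toNat fname.toList :=
      fun n hn => PySem.List.slice_from fname.toList hn
    simp only [fname_to_uri, fname_to_uri_alt, hkeys, List.foldl_cons, List.foldl_nil,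
      hb1, hb2, hb3, hb4, hb5, hb6, hb7, hsplit]
    by_cases hd0 : h = ['d','b','o']
    · subst hd0
      have hs' : PySem.List.slice fname.toList (some (4 : Int)) none = r := by
        rw [hsl 4 (by norm_num), hl]
        simp
      apply String.ext
      cases rs <;>
        simp [pv_join2, pvBaseOf, PySem.Str.toList_replace, pv_replace_map, hs',
          show pvPrefA.getD "dbo" "" = "dbpedia.org/ontology" from rfl]
    by_cases hd1 : h = ['d','b','p']
    · subst hd1
      have hs' : PySem.List.slice fname.toList (some (4 : Int)) none = r := by
        rw [hsl 4 (by norm_num), hl]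
        simp
      apply String.ext
      cases rs <;>
        simp [pv_join2, pvBaseOf, PySem.Str.toList_replace, pv_replace_map, hs',
          show pvPrefA.getD "dbp" "" = "dbpedia.org/property" from rfl]
    by_cases hd2 : h = ['d','b','r']
    · subst hd2
      have hs' : PySem.List.slice fname.toList (some (4 : Int)) none = r := by
        rw [hsl 4 (by norm_num), hl]
        simp
      apply String.ext
      cases rs <;>
        simp [pv_join2, pvBaseOf, PySem.Str.toList_replace, pv_replace_map, hs',
          show pvPrefA.getD "dbr" "" = "dbpedia.org/resource" from rfl]
    by_cases hd3 : h = ['f','o','a','f']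
    · subst hd3
      have hs' : PySem.List.slice fname.toList (some (5 : Int)) none = r := by
        rw [hsl 5 (by norm_num), hl]
        simp
      apply String.ext
      cases rs <;>
        simp [pv_join2, pvBaseOf, PySem.Str.toList_replace, pv_replace_map, hs',
          show pvPrefA.getD "foaf" "" = "xmlns.com/foaf/0.1" from rfl]
    by_cases hd4 : h = ['o','w','l']
    · subst hd4
      have hs' : PySem.List.slice fname.toList (some (4 : Int)) none = r := by
        rw [hsl 4 (by norm_num), hl]
        simp
      apply String.ext
      cases rs <;>
        simp [pv_join2, pvBaseOf, PySem.Str.toList_replace, pv_replace_map, hs',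
          show pvPrefA.getD "owl" "" = "www.w3.org/2002/07/owl" from rfl]
    by_cases hd5 : h = ['r','d','f','s']
    · subst hd5
      have hs' : PySem.List.slice fname.toList (some (5 : Int)) none = r := by
        rw [hsl 5 (by norm_num), hl]
        simp
      apply String.ext
      cases rs <;>
        simp [pv_join2, pvBaseOf, PySem.Str.toList_replace, pv_replace_map, hs',
          show pvPrefA.getD "rdfs" "" = "www.w3.org/2000/01/rdf-schema" from rfl]
    by_cases hd6 : h = ['r','d','f']
    · subst hd6
      have hs' : PySem.List.slice fname.toList (some (4 : Int)) none = r := by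
        rw [hsl 4 (by norm_num), hl]
        simp
      apply String.ext
      cases rs <;>
        simp [pv_join2, pvBaseOf, PySem.Str.toList_replace, pv_replace_map, hs',
          show pvPrefA.getD "rdf" "" = "www.w3.org/1999/02/22-rdf-syntax-ns" from rfl]
    -- no key matches: both fall back to empty base and rel
    have hB : pvBaseOf h = none := by
      simp [pvBaseOf, hd0, hd1, hd2, hd3, hd4, hd5, hd6]
    have hd0' : "dbo".toList ≠ h := fun e => hd0 (e.symm.trans rfl)
    have hd1' : "dbp".toList ≠ h := fun e => hd1 (e.symm.trans rfl)
    have hd2' : "dbr".toList ≠ h := fun e => hd2 (e.symm.trans rfl)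
    have hd3' : "foaf".toList ≠ h := fun e => hd3 (e.symm.trans rfl)
    have hd4' : "owl".toList ≠ h := fun e => hd4 (e.symm.trans rfl)
    have hd5' : "rdfs".toList ≠ h := fun e => hd5 (e.symm.trans rfl)
    have hd6' : "rdf".toList ≠ h := fun e => hd6 (e.symm.trans rfl)
    rw [hB]
    simp only [hd0', hd1', hd2', hd3', hd4', hd5', hd6', if_false, decide_false]
    apply String.ext
    cases rs <;>
      simp [pv_join2, PySem.Str.toList_replace, pv_replace_map]
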